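-- pv_equiv track=rewrite | github.com/kton-black/Capstone1 | direcFunc.py | search_words
-- ===== SOURCE A (Python) =====
-- def search_words(grid, words):
--     matches = {}
--     found_words = []
--     rows = len(grid)
--     cols = len(grid[0])
--
--     # search left to right
--     for i in range(rows):
--         for j in range(cols):
--             if grid[i][j] != '-':
--                 # search horizontally
--                 h_word = ''
--                 for k in range(j, cols):
--                     if grid[i][k] == '-':
--                         break
--                     h_word += grid[i][k]
--                     if h_word in words:
--                         if h_word in matches:
--                             matches[h_word] += 1
--                         else:
--                             matches[h_word] = 1
--                         found_words.append(h_word)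
--
--                 # search vertically
--                 v_word = ''
--                 for k in range(i, rows):
--                     if grid[k][j] == '-':
--                         break
--                     v_word += grid[k][j]
--                     if v_word in words:
--                         if v_word in matches:
--                             matches[v_word] += 1
--                         else:
--                             matches[v_word] = 1
--                         found_words.append(v_word)
--
--     return matches, found_words
-- ===== SOURCE B (Python) =====
-- def search_words(grid, words):
--     # Flat trie over the words: parallel arrays of child dicts and stored words.
--     children = [{}]
--     word_at = [None]
--     for w in words:
--         node = 0
--         for ch in w:
--             nxt = children[node].get(ch)
--             if nxt is None:
--                 nxt = len(children)
--                 children[node][ch] = nxt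
--                 children.append({})
--                 word_at.append(None)
--             node = nxt
--         word_at[node] = w
--
--     rows = len(grid)
--     cols = len(grid[0])
--     found_words = []
--     for i in range(rows):
--         for j in range(cols):
--             if grid[i][j] != '-':
--                 # horizontal ray: walk the trie, no string building
--                 node = 0
--                 for k in range(j, cols):
--                     cell = grid[i][k]
--                     if cell == '-':
--                         break
--                     for ch in cell:
--                         node = children[node].get(ch)
--                         if node is None:
--                             break
--                     if node is None:
--                         break
--                     w = word_at[node]
--                     if w is not None:
--                         found_words.append(w)
--                 # vertical ray
--                 node = 0
--                 for k in range(i, rows):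
--                     cell = grid[k][j]
--                     if cell == '-':
--                         break
--                     for ch in cell:
--                         node = children[node].get(ch)
--                         if node is None:
--                             break
--                     if node is None:
--                         break
--                     w = word_at[node]
--                     if w is not None:
--                         found_words.append(w)
--
--     matches = {}
--     for w in found_words:
--         matches[w] = matches.get(w, 0) + 1
--     return matches, found_words
-- ===== Notes on version B (the rewrite author's own statement) =====
-- stated objective: faster
-- what changed: B builds a trie over the words once (flat arrays of child-dicts plus the word stored at terminal nodes) and walks each grid ray with a node cursor, pruning dead rays early, instead of A's incremental string concatenation with an 'in words' list scan per prefix; matches are counted once at the end from found_words instead of being maintained inside the loops.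
import Mathlib
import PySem

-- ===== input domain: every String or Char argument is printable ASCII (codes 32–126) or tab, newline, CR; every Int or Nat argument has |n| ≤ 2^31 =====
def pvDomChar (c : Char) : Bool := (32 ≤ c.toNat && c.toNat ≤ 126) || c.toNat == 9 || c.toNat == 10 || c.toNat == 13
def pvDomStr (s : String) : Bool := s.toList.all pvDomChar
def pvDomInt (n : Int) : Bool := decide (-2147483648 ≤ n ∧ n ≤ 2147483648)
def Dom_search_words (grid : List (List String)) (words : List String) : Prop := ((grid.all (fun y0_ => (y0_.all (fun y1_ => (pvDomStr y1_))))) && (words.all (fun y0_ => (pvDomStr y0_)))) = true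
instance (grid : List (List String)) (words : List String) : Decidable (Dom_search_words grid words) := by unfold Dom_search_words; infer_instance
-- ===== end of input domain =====

-- B replaces A's per-prefix 'h_word in words' list scan and incremental string building by a trie
-- (flat node arrays) walked one character at a time, counting matches once at the end (faster).

-- ===== PORT A =====
-- A's 'if h_word in matches: matches[h_word] += 1 else: matches[h_word] = 1'
def swBump (m : PySem.Dict String Int) (w : String) : PySem.Dict String Int :=
  if m.contains w then m.insert w (m.getD w 0 + 1) else m.insert w 1

-- A's inner 'for k in range(.., ..)' ray loop (used for both the horizontal and the vertical copy)
def swRayA (get : Int → String) (words : List String) (ks : List Int) (word : String)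
    (st : PySem.Dict String Int × List String) : PySem.Dict String Int × List String :=
  match ks with
  | [] => st
  | k :: rest =>
    let c := get k
    if c = "-" then st
    else
      let word2 := word ++ c
      let st2 := if word2 ∈ words then (swBump st.1 word2, st.2 ++ [word2]) else st
      swRayA get words rest word2 st2

def search_words (grid : List (List String)) (words : List String) :
    (List (String × Int)) × List String :=
  let rows : Int := PySem.List.len grid
  let cols : Int := PySem.List.len (PySem.List.pyGetD grid 0 [])
  let st := (PySem.List.pyRange 0 rows 1).foldl (fun st i =>
    (PySem.List.pyRange 0 cols 1).foldl (fun st j =>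
      if PySem.List.pyGetD (PySem.List.pyGetD grid i []) j "" ≠ "-" then
        let st := swRayA (fun k => PySem.List.pyGetD (PySem.List.pyGetD grid i []) k "") words
          (PySem.List.pyRange j cols 1) "" st
        swRayA (fun k => PySem.List.pyGetD (PySem.List.pyGetD grid k []) j "") words
          (PySem.List.pyRange i rows 1) "" st
      else st) st) (PySem.Dict.empty, [])
  (st.1.items, st.2)

-- ===== PORT B =====
-- B's 'children[node].get(ch)'
def swLookup (children : List (PySem.Dict Char Nat)) (node : Nat) (c : Char) : Option Nat :=
  (children.getD node PySem.Dict.empty).get? c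

-- B's per-cell 'for ch in cell' trie walk
def swWalk (children : List (PySem.Dict Char Nat)) (node : Nat) (cs : List Char) : Option Nat :=
  match cs with
  | [] => some node
  | c :: rest =>
    match swLookup children node c with
    | none => none
    | some n => swWalk children n rest

-- B's 'for ch in w' insertion loop
def swInsertChars (children : List (PySem.Dict Char Nat)) (wordAt : List (Option String))
    (node : Nat) (cs : List Char) :
    List (PySem.Dict Char Nat) × List (Option String) × Nat :=
  match cs with
  | [] => (children, wordAt, node)
  | c :: rest =>
    match swLookup children node c with
    | some nxt => swInsertChars children wordAt nxt rest
    | none =>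
      let nxt := children.length
      swInsertChars
        (children.set node ((children.getD node PySem.Dict.empty).insert c nxt) ++ [PySem.Dict.empty])
        (wordAt ++ [none]) nxt rest

def swInsertWord (children : List (PySem.Dict Char Nat)) (wordAt : List (Option String))
    (w : String) : List (PySem.Dict Char Nat) × List (Option String) :=
  let r := swInsertChars children wordAt 0 w.toList
  (r.1, r.2.1.set r.2.2 (some w))

def swBuild (words : List String) : List (PySem.Dict Char Nat) × List (Option String) :=
  words.foldl (fun tr w => swInsertWord tr.1 tr.2 w) ([PySem.Dict.empty], [none])

-- B's ray loop: a node cursor instead of a growing string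
def swRayB (children : List (PySem.Dict Char Nat)) (wordAt : List (Option String))
    (get : Int → String) (ks : List Int) (node : Nat) (found : List String) : List String :=
  match ks with
  | [] => found
  | k :: rest =>
    let c := get k
    if c = "-" then found
    else
      match swWalk children node c.toList with
      | none => found
      | some n =>
        match wordAt.getD n none with
        | some w => swRayB children wordAt get rest n (found ++ [w])
        | none => swRayB children wordAt get rest n found

def search_words_alt (grid : List (List String)) (words : List String) :
    (List (String × Int)) × List String :=
  let tr := swBuild words
  let rows : Int := PySem.List.len grid
  let cols : Int := PySem.List.len (PySem.List.pyGetD grid 0 [])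
  let found := (PySem.List.pyRange 0 rows 1).foldl (fun fd i =>
    (PySem.List.pyRange 0 cols 1).foldl (fun fd j =>
      if PySem.List.pyGetD (PySem.List.pyGetD grid i []) j "" ≠ "-" then
        let fd := swRayB tr.1 tr.2 (fun k => PySem.List.pyGetD (PySem.List.pyGetD grid i []) k "")
          (PySem.List.pyRange j cols 1) 0 fd
        swRayB tr.1 tr.2 (fun k => PySem.List.pyGetD (PySem.List.pyGetD grid k []) j "")
          (PySem.List.pyRange i rows 1) 0 fd
      else fd) fd) []
  let ms := found.foldl (fun m w => m.insert w (m.getD w 0 + 1)) PySem.Dict.empty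
  (ms.items, found)

-- ===== PRECONDITION & SPEC =====
-- Pre_ excludes exactly the inputs where Python A raises IndexError: the empty grid
-- (grid[0]) and grids with a row shorter than the first row (grid[i][j] for j < cols).
def Pre_search_words (grid : List (List String)) (words : List String) : Prop :=
  grid ≠ [] ∧ ∀ row ∈ grid, (grid.headD []).length ≤ row.length
instance (grid : List (List String)) (words : List String) : Decidable (Pre_search_words grid words) := by unfold Pre_search_words; infer_instance
def pvWitness_search_words : List (List String) × List String := ([["a", "b"], ["c", "d"]], ["ab", "ac"])
def Spec_search_words (grid : List (List String)) (words : List String) (out : (List (String × Int)) × List String) : Prop := out = search_words_alt grid words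
instance (grid : List (List String)) (words : List String) (out : (List (String × Int)) × List String) : Decidable (Spec_search_words grid words out) := by unfold Spec_search_words; infer_instance

-- ===== CLAIM (what is proved, stated in full; the proofs are below) =====
def Claim_equal_search_words : Prop := ∀ (grid : List (List String)) (words : List String), Dom_search_words grid words → Pre_search_words grid words → Spec_search_words grid words (search_words grid words)

-- ===== LEMMAS AND PROOFS =====

theorem swWalk_append (ch : List (PySem.Dict Char Nat)) (s t : List Char) :
    ∀ n, swWalk ch n (s ++ t) =
      match swWalk ch n s with
      | none => none
      | some m => swWalk ch m t := by
  induction s with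
  | nil => intro n; simp [swWalk]
  | cons c rest ih =>
    intro n
    simp only [List.cons_append, swWalk]
    cases h : swLookup ch n c <;> simp [ih]

theorem swWalk_mono {ch ch' : List (PySem.Dict Char Nat)}
    (hext : ∀ m c k, swLookup ch m c = some k → swLookup ch' m c = some k) :
    ∀ s n k, swWalk ch n s = some k → swWalk ch' n s = some k := by
  intro s
  induction s with
  | nil => intro n k h; simpa [swWalk] using h
  | cons c rest ih =>
    intro n k h
    cases hl : swLookup ch n c with
    | none => simp [swWalk, hl] at h
    | some t =>
      simp only [swWalk, hl] at h
      simp only [swWalk, hext _ _ _ hl]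
      exact ih t k h

theorem swLookup_default {ch : List (PySem.Dict Char Nat)} {m : Nat} (c : Char)
    (h : ch.length ≤ m) : swLookup ch m c = none := by
  simp [swLookup, List.getD_eq_getElem?_getD, List.getElem?_eq_none h]

theorem swLookup_set_append (ch : List (PySem.Dict Char Nat)) (node : Nat) (c : Char)
    (hnode : node < ch.length) (m : Nat) (e : Char) :
    swLookup (ch.set node ((ch.getD node PySem.Dict.empty).insert c ch.length) ++ [PySem.Dict.empty]) m e =
      if m = node ∧ e = c then some ch.length else swLookup ch m e := by
  rcases lt_trichotomy m ch.length with hm | hm | hm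
  · have h1 : (ch.set node ((ch.getD node PySem.Dict.empty).insert c ch.length) ++ [PySem.Dict.empty]).getD m PySem.Dict.empty
        = (ch.set node ((ch.getD node PySem.Dict.empty).insert c ch.length)).getD m PySem.Dict.empty :=
      List.getD_append _ _ _ _ (by simpa using hm)
    rw [swLookup, h1]
    by_cases hmn : m = node
    · subst hmn
      rw [List.getD_eq_getElem?_getD, List.getElem?_set_self (by simpa using hm)]
      simp only [Option.getD_some]
      rw [PySem.Dict.get?_insert]
      by_cases he : e = c <;> simp [he, swLookup]
    · rw [List.getD_eq_getElem?_getD, List.getElem?_set_ne (by omega)]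
      simp [hmn, swLookup, List.getD_eq_getElem?_getD]
  · have h1 : (ch.set node ((ch.getD node PySem.Dict.empty).insert c ch.length) ++ [PySem.Dict.empty]).getD m PySem.Dict.empty = PySem.Dict.empty := by
      rw [List.getD_eq_getElem?_getD, hm, List.getElem?_append_right (by simp)]
      simp
    rw [swLookup, h1, swLookup_default e (le_of_eq hm.symm)]
    have hne : ¬ (m = node ∧ e = c) := by intro hh; omega
    simp [hne]
  · rw [swLookup, List.getD_eq_getElem?_getD, List.getElem?_eq_none (by simp; omega)]
    rw [swLookup_default e (by omega)]
    have hne : ¬ (m = node ∧ e = c) := by intro hh; omega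
    simp [hne]

theorem swWalk_new {ch : List (PySem.Dict Char Nat)} {node : Nat} {c : Char}
    (hnode : node < ch.length) :
    ∀ (s : List Char) (m k : Nat),
      swWalk (ch.set node ((ch.getD node PySem.Dict.empty).insert c ch.length) ++ [PySem.Dict.empty]) m s = some k →
      swWalk ch m s = some k ∨
        ∃ r, s = r ++ [c] ∧ swWalk ch m r = some node ∧ k = ch.length := by
  intro s
  induction s with
  | nil => intro m k h; exact Or.inl h
  | cons e rest ih =>
    intro m k h
    rw [swWalk, swLookup_set_append ch node c hnode m e] at h
    by_cases hme : m = node ∧ e = c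
    · rw [if_pos hme] at h
      obtain ⟨hm, he⟩ := hme
      have h' : swWalk (ch.set node ((ch.getD node PySem.Dict.empty).insert c ch.length) ++ [PySem.Dict.empty]) ch.length rest = some k := h
      cases rest with
      | nil =>
        rw [swWalk] at h'
        injection h' with h'
        exact Or.inr ⟨[], by simp [he], by simp [swWalk, hm], h'.symm⟩
      | cons e' rest' =>
        rw [swWalk, swLookup_set_append ch node c hnode ch.length e',
          if_neg (by intro hh; omega), swLookup_default e' (le_refl _)] at h'
        simp at h'
    · rw [if_neg hme] at h
      cases hl : swLookup ch m e with
      | none => rw [hl] at h; simp at h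
      | some t =>
        rw [hl] at h
        have h' : swWalk (ch.set node ((ch.getD node PySem.Dict.empty).insert c ch.length) ++ [PySem.Dict.empty]) t rest = some k := h
        rcases ih t k h' with hold | ⟨r, hr, hwr, hk⟩
        · exact Or.inl (by rw [swWalk, hl]; exact hold)
        · exact Or.inr ⟨e :: r, by simp [hr], by rw [swWalk, hl]; exact hwr, hk⟩

structure swInv (ch : List (PySem.Dict Char Nat)) (wa : List (Option String))
    (P : List Char → Prop) (ws : List String) : Prop where
  len_eq : ch.length = wa.length
  dom : ∀ s, (swWalk ch 0 s).isSome ↔ P s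
  bound : ∀ s n, swWalk ch 0 s = some n → n < ch.length
  inj : ∀ s t n, swWalk ch 0 s = some n → swWalk ch 0 t = some n → s = t
  waSpec : ∀ s n, swWalk ch 0 s = some n →
      wa.getD n none = if String.ofList s ∈ ws then some (String.ofList s) else none
  wordsDom : ∀ w ∈ ws, (swWalk ch 0 w.toList).isSome

theorem swInv_congr {ch wa P Q ws} (h : swInv ch wa P ws) (hpq : ∀ s, P s ↔ Q s) :
    swInv ch wa Q ws :=
  ⟨h.len_eq, fun s => (h.dom s).trans (hpq s), h.bound, h.inj, h.waSpec, h.wordsDom⟩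

theorem swStep_inv {ch wa P ws} {p : List Char} {node : Nat} {c : Char}
    (h : swInv ch wa P ws) (hp : swWalk ch 0 p = some node)
    (hnone : swLookup ch node c = none) :
    swInv (ch.set node ((ch.getD node PySem.Dict.empty).insert c ch.length) ++ [PySem.Dict.empty])
      (wa ++ [none]) (fun s => P s ∨ s = p ++ [c]) ws ∧
    swWalk (ch.set node ((ch.getD node PySem.Dict.empty).insert c ch.length) ++ [PySem.Dict.empty])
      0 (p ++ [c]) = some ch.length := by
  have hnode : node < ch.length := h.bound p node hp
  set ch2 := ch.set node ((ch.getD node PySem.Dict.empty).insert c ch.length) ++ [PySem.Dict.empty] with hch2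
  have hext : ∀ m e k, swLookup ch m e = some k → swLookup ch2 m e = some k := by
    intro m e k hk
    rw [hch2, swLookup_set_append ch node c hnode m e]
    by_cases hme : m = node ∧ e = c
    · obtain ⟨hm, he⟩ := hme; rw [hm, he, hnone] at hk; simp at hk
    · rw [if_neg hme]; exact hk
  have hmono := swWalk_mono hext
  have hwp2 : swWalk ch2 0 p = some node := hmono p 0 node hp
  have hlk : swLookup ch2 node c = some ch.length := by
    rw [hch2, swLookup_set_append ch node c hnode node c, if_pos ⟨rfl, rfl⟩]
  have hnew : swWalk ch2 0 (p ++ [c]) = some ch.length := by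
    rw [swWalk_append ch2 p [c] 0, hwp2]
    simp [swWalk, hlk]
  have hdead : swWalk ch 0 (p ++ [c]) = none := by
    rw [swWalk_append ch p [c] 0, hp]
    simp [swWalk, hnone]
  refine ⟨⟨?_, ?_, ?_, ?_, ?_, ?_⟩, hnew⟩
  · simp [hch2, h.len_eq]
  · intro s
    constructor
    · intro hs
      obtain ⟨k, hk⟩ := Option.isSome_iff_exists.mp hs
      rcases swWalk_new hnode s 0 k hk with hold | ⟨r, hr, hwr, _⟩
      · exact Or.inl ((h.dom s).mp (by rw [hold]; rfl))
      · exact Or.inr (by rw [hr, h.inj r p node hwr hp])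
    · rintro (hs | rfl)
      · obtain ⟨k, hk⟩ := Option.isSome_iff_exists.mp ((h.dom s).mpr hs)
        rw [hmono s 0 k hk]; rfl
      · rw [hnew]; rfl
  · intro s n hk
    have hl2 : ch2.length = ch.length + 1 := by simp [hch2]
    rcases swWalk_new hnode s 0 n hk with hold | ⟨r, hr, hwr, hn⟩
    · have := h.bound s n hold; omega
    · omega
  · intro s t n hs ht
    rcases swWalk_new hnode s 0 n hs with holds | ⟨r1, hr1, hwr1, hn1⟩ <;>
      rcases swWalk_new hnode t 0 n ht with holdt | ⟨r2, hr2, hwr2, hn2⟩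
    · exact h.inj s t n holds holdt
    · have := h.bound s n holds; omega
    · have := h.bound t n holdt; omega
    · rw [hr1, hr2, h.inj r1 r2 node hwr1 hwr2]
  · intro s n hk
    rcases swWalk_new hnode s 0 n hk with hold | ⟨r, hr, hwr, hn⟩
    · have hb := h.bound s n hold
      rw [List.getD_append _ _ _ _ (by rw [← h.len_eq]; exact hb)]
      exact h.waSpec s n hold
    · have hr' : r = p := h.inj r p node hwr hp
      subst hr'
      have hnot : String.ofList s ∉ ws := by
        intro hmem
        have hd := h.wordsDom _ hmem
        rw [String.toList_ofList, hr, hdead] at hd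
        simp at hd
      rw [if_neg hnot, hn, h.len_eq, List.getD_eq_getElem?_getD,
        List.getElem?_append_right (le_refl _)]
      simp
  · intro w hw
    obtain ⟨k, hk⟩ := Option.isSome_iff_exists.mp (h.wordsDom w hw)
    rw [hmono _ 0 k hk]; rfl

def swP (words : List String) (s : List Char) : Prop := s = [] ∨ ∃ w ∈ words, s <+: w.toList

theorem swInsertChars_inv {ws : List String} :
    ∀ (cs : List Char) (ch : List (PySem.Dict Char Nat)) (wa : List (Option String))
      (P : List Char → Prop) (p : List Char) (node : Nat),
      swInv ch wa P ws → swWalk ch 0 p = some node →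
      swInv (swInsertChars ch wa node cs).1 (swInsertChars ch wa node cs).2.1
          (fun s => P s ∨ ∃ ds, ds <+: cs ∧ s = p ++ ds) ws ∧
        swWalk (swInsertChars ch wa node cs).1 0 (p ++ cs) =
          some (swInsertChars ch wa node cs).2.2 := by
  intro cs
  induction cs with
  | nil =>
    intro ch wa P p node h hp
    simp only [swInsertChars]
    refine ⟨swInv_congr h fun s => ⟨fun hs => Or.inl hs, ?_⟩, by simpa using hp⟩
    rintro (hs | ⟨ds, hds, rfl⟩)
    · exact hs
    · rw [List.prefix_nil.mp hds, List.append_nil]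
      exact (h.dom p).mp (by rw [hp]; rfl)
  | cons c rest ih =>
    intro ch wa P p node h hp
    cases hl : swLookup ch node c with
    | some nxt =>
      simp only [swInsertChars, hl]
      have hstep : swWalk ch 0 (p ++ [c]) = some nxt := by
        rw [swWalk_append ch p [c] 0, hp]; simp [swWalk, hl]
      obtain ⟨inv', hw'⟩ := ih ch wa P (p ++ [c]) nxt h hstep
      have hre : (p ++ [c]) ++ rest = p ++ (c :: rest) := by simp
      refine ⟨swInv_congr inv' fun s => ⟨?_, ?_⟩, by rw [← hre]; exact hw'⟩
      · rintro (hs | ⟨ds, hds, rfl⟩)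
        · exact Or.inl hs
        · exact Or.inr ⟨c :: ds, List.cons_prefix_cons.mpr ⟨rfl, hds⟩, by simp⟩
      · rintro (hs | ⟨ds, hds, rfl⟩)
        · exact Or.inl hs
        · cases ds with
          | nil =>
            have hP : P p := (h.dom p).mp (by rw [hp]; rfl)
            exact Or.inl (by simpa using hP)
          | cons d ds' =>
            obtain ⟨rfl, hds'⟩ := List.cons_prefix_cons.mp hds
            exact Or.inr ⟨ds', hds', by simp⟩
    | none =>
      simp only [swInsertChars, hl]
      obtain ⟨inv2, hw2⟩ := swStep_inv h hp hl
      obtain ⟨inv', hw'⟩ := ih _ _ _ (p ++ [c]) ch.length inv2 hw2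
      have hre : (p ++ [c]) ++ rest = p ++ (c :: rest) := by simp
      refine ⟨swInv_congr inv' fun s => ⟨?_, ?_⟩, by rw [← hre]; exact hw'⟩
      · rintro ((hs | rfl) | ⟨ds, hds, rfl⟩)
        · exact Or.inl hs
        · exact Or.inr ⟨[c], List.cons_prefix_cons.mpr ⟨rfl, List.nil_prefix⟩, rfl⟩
        · exact Or.inr ⟨c :: ds, List.cons_prefix_cons.mpr ⟨rfl, hds⟩, by simp⟩
      · rintro (hs | ⟨ds, hds, rfl⟩)
        · exact Or.inl (Or.inl hs)
        · cases ds with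
          | nil =>
            have hP : P p := (h.dom p).mp (by rw [hp]; rfl)
            exact Or.inl (Or.inl (by simpa using hP))
          | cons d ds' =>
            obtain ⟨rfl, hds'⟩ := List.cons_prefix_cons.mp hds
            exact Or.inr ⟨ds', hds', by simp⟩

theorem swInsertWord_inv {ch wa P ws} (w : String) (h : swInv ch wa P ws) :
    swInv (swInsertWord ch wa w).1 (swInsertWord ch wa w).2
      (fun s => P s ∨ s <+: w.toList) (ws ++ [w]) := by
  obtain ⟨inv', hw0⟩ := swInsertChars_inv w.toList ch wa P [] 0 h rfl
  have hw' : swWalk (swInsertChars ch wa 0 w.toList).1 0 w.toList =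
      some (swInsertChars ch wa 0 w.toList).2.2 := by simpa using hw0
  have hb : (swInsertChars ch wa 0 w.toList).2.2 < (swInsertChars ch wa 0 w.toList).2.1.length := by
    rw [← inv'.len_eq]; exact inv'.bound _ _ hw'
  simp only [swInsertWord]
  refine ⟨?_, ?_, inv'.bound, inv'.inj, ?_, ?_⟩
  · simp [inv'.len_eq]
  · intro s
    refine (inv'.dom s).trans ⟨?_, ?_⟩
    · rintro (hs | ⟨ds, hds, rfl⟩)
      · exact Or.inl hs
      · exact Or.inr (by simpa using hds)
    · rintro (hs | hs)
      · exact Or.inl hs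
      · exact Or.inr ⟨s, hs, by simp⟩
  · intro s n hw
    by_cases hn : n = (swInsertChars ch wa 0 w.toList).2.2
    · subst hn
      have hs : s = w.toList := inv'.inj s w.toList _ hw hw'
      subst hs
      rw [List.getD_eq_getElem?_getD, List.getElem?_set_self hb]
      simp
    · rw [List.getD_eq_getElem?_getD, List.getElem?_set_ne (by omega), ← List.getD_eq_getElem?_getD]
      have hne : String.ofList s ≠ w := by
        intro he
        have hts : w.toList = s := by rw [← he, String.toList_ofList]
        subst hts
        rw [hw'] at hw
        exact hn (Option.some.inj hw).symm
      rw [inv'.waSpec s n hw]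
      by_cases hmem : String.ofList s ∈ ws
      · simp [hmem]
      · simp [hmem, hne]
  · intro w' hw'mem
    rcases List.mem_append.mp hw'mem with hmem | hmem
    · exact inv'.wordsDom w' hmem
    · rw [List.mem_singleton.mp hmem, hw']; rfl

theorem swBuild_inv_aux :
    ∀ (rest : List String) (ch : List (PySem.Dict Char Nat)) (wa : List (Option String))
      (P : List Char → Prop) (ws : List String), swInv ch wa P ws →
      swInv (rest.foldl (fun tr w => swInsertWord tr.1 tr.2 w) (ch, wa)).1
        (rest.foldl (fun tr w => swInsertWord tr.1 tr.2 w) (ch, wa)).2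
        (fun s => P s ∨ ∃ w ∈ rest, s <+: w.toList) (ws ++ rest) := by
  intro rest
  induction rest with
  | nil =>
    intro ch wa P ws h
    simp only [List.foldl_nil, List.append_nil]
    exact swInv_congr h fun s => ⟨fun hs => Or.inl hs, by rintro (hs | ⟨w, hw, _⟩); exacts [hs, absurd hw (List.not_mem_nil)]⟩
  | cons w rest ih =>
    intro ch wa P ws h
    simp only [List.foldl_cons]
    have h1 := swInsertWord_inv w h
    have h2 := ih (swInsertWord ch wa w).1 (swInsertWord ch wa w).2 _ _ h1
    rw [Prod.mk.eta] at h2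
    have hws : (ws ++ [w]) ++ rest = ws ++ (w :: rest) := by simp
    rw [hws] at h2
    refine swInv_congr h2 fun s => ⟨?_, ?_⟩
    · rintro ((hs | hs) | ⟨w', hw', hs⟩)
      · exact Or.inl hs
      · exact Or.inr ⟨w, List.mem_cons_self, hs⟩
      · exact Or.inr ⟨w', List.mem_cons_of_mem _ hw', hs⟩
    · rintro (hs | ⟨w', hw', hs⟩)
      · exact Or.inl (Or.inl hs)
      · rcases List.mem_cons.mp hw' with rfl | hw''
        · exact Or.inl (Or.inr hs)
        · exact Or.inr ⟨w', hw'', hs⟩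

theorem swInv_init : swInv [PySem.Dict.empty] [none] (fun s => s = []) [] := by
  have hwalk : ∀ s n, swWalk [PySem.Dict.empty] 0 s = some n → s = [] ∧ n = 0 := by
    intro s n hw
    cases s with
    | nil => exact ⟨rfl, by simpa [swWalk] using hw.symm⟩
    | cons c rest => simp [swWalk, swLookup] at hw
  refine ⟨rfl, ?_, ?_, ?_, ?_, by simp⟩
  · intro s
    cases s with
    | nil => simp [swWalk]
    | cons c rest => simp [swWalk, swLookup]
  · intro s n hw; rw [(hwalk s n hw).2]; simp
  · intro s t n hs ht; rw [(hwalk s n hs).1, (hwalk t n ht).1]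
  · intro s n hw
    obtain ⟨rfl, rfl⟩ := hwalk s n hw
    simp

theorem swBuild_inv (words : List String) :
    swInv (swBuild words).1 (swBuild words).2 (swP words) words := by
  have h := swBuild_inv_aux words [PySem.Dict.empty] [none] (fun s => s = []) [] swInv_init
  rw [List.nil_append] at h
  exact swInv_congr h fun s => Iff.rfl

def swRayWords (get : Int → String) (words : List String) (ks : List Int) (pref : String) :
    List String :=
  match ks with
  | [] => []
  | k :: rest =>
    let c := get k
    if c = "-" then []
    else (if (pref ++ c) ∈ words then [pref ++ c] else []) ++ swRayWords get words rest (pref ++ c)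

theorem swRayWords_eq_nil (get : Int → String) (words : List String) :
    ∀ (ks : List Int) (pref : String), (∀ w ∈ words, ¬ pref.toList <+: w.toList) →
      swRayWords get words ks pref = [] := by
  intro ks
  induction ks with
  | nil => intro pref _; simp [swRayWords]
  | cons k rest ih =>
    intro pref h
    simp only [swRayWords]
    by_cases hc : get k = "-"
    · simp [hc]
    · have hpre : pref.toList <+: (pref ++ get k).toList := by
        simp [List.prefix_append]
      have h1 : (pref ++ get k) ∉ words := fun hm => h _ hm hpre
      have h2 : ∀ w ∈ words, ¬ (pref ++ get k).toList <+: w.toList :=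
        fun w hw hp2 => h w hw (hpre.trans hp2)
      simp [hc, h1, ih _ h2]

theorem swRayA_eq (get : Int → String) (words : List String) :
    ∀ (ks : List Int) (pref : String) (m : PySem.Dict String Int) (f : List String),
      swRayA get words ks pref (m, f) =
        ((swRayWords get words ks pref).foldl swBump m, f ++ swRayWords get words ks pref) := by
  intro ks
  induction ks with
  | nil => intro pref m f; simp [swRayA, swRayWords]
  | cons k rest ih =>
    intro pref m f
    simp only [swRayA, swRayWords]
    by_cases hc : get k = "-"
    · simp [hc]
    · by_cases hmem : (pref ++ get k) ∈ words
      · simp only [if_neg hc, if_pos hmem]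
        rw [ih]
        simp
      · rw [if_neg hc, if_neg hc, if_neg hmem, if_neg hmem, ih]
        simp

theorem swRayB_eq {ch : List (PySem.Dict Char Nat)} {wa : List (Option String)}
    {words : List String} (h : swInv ch wa (swP words) words) (get : Int → String) :
    ∀ (ks : List Int) (pref : String) (node : Nat) (f : List String),
      swWalk ch 0 pref.toList = some node →
      swRayB ch wa get ks node f = f ++ swRayWords get words ks pref := by
  intro ks
  induction ks with
  | nil => intro pref node f _; simp [swRayB, swRayWords]
  | cons k rest ih =>
    intro pref node f hp
    simp only [swRayB, swRayWords]
    by_cases hc : get k = "-"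
    · simp [hc]
    · rw [if_neg hc, if_neg hc]
      have hfull : swWalk ch 0 (pref ++ get k).toList = swWalk ch node (get k).toList := by
        rw [String.toList_append, swWalk_append ch pref.toList (get k).toList 0, hp]
      cases hn : swWalk ch node (get k).toList with
      | some n =>
        have hw2 : swWalk ch 0 (pref ++ get k).toList = some n := by rw [hfull, hn]
        have hwa := h.waSpec _ n hw2
        rw [String.ofList_toList] at hwa
        show (match wa.getD n none with
          | some w => swRayB ch wa get rest n (f ++ [w])
          | none => swRayB ch wa get rest n f) =
            f ++ ((if pref ++ get k ∈ words then [pref ++ get k] else []) ++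
              swRayWords get words rest (pref ++ get k))
        by_cases hmem : (pref ++ get k) ∈ words
        · rw [if_pos hmem] at hwa
          rw [hwa]
          show swRayB ch wa get rest n (f ++ [pref ++ get k]) = _
          rw [ih (pref ++ get k) n (f ++ [pref ++ get k]) hw2]
          simp [hmem]
        · rw [if_neg hmem] at hwa
          rw [hwa]
          show swRayB ch wa get rest n f = _
          rw [ih (pref ++ get k) n f hw2]
          simp [hmem]
      | none =>
        have hw2 : swWalk ch 0 (pref ++ get k).toList = none := by rw [hfull, hn]
        have hnP : ¬ swP words (pref ++ get k).toList := by
          intro hPs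
          have hd := (h.dom _).mpr hPs
          rw [hw2] at hd
          simp at hd
        have hmem : (pref ++ get k) ∉ words :=
          fun hm => hnP (Or.inr ⟨_, hm, List.prefix_refl _⟩)
        have hnil : swRayWords get words rest (pref ++ get k) = [] :=
          swRayWords_eq_nil get words rest (pref ++ get k)
            (fun w hw hpre => hnP (Or.inr ⟨w, hw, hpre⟩))
        simp [hmem, hnil]

def swCellWords (grid : List (List String)) (words : List String) (rows cols i j : Int) :
    List String :=
  if PySem.List.pyGetD (PySem.List.pyGetD grid i []) j "" ≠ "-" then
    swRayWords (fun k => PySem.List.pyGetD (PySem.List.pyGetD grid i []) k "") words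
      (PySem.List.pyRange j cols 1) "" ++
    swRayWords (fun k => PySem.List.pyGetD (PySem.List.pyGetD grid k []) j "") words
      (PySem.List.pyRange i rows 1) ""
  else []

def swAllWords (grid : List (List String)) (words : List String) : List String :=
  (PySem.List.pyRange 0 (PySem.List.len grid) 1).flatMap fun i =>
    (PySem.List.pyRange 0 (PySem.List.len (PySem.List.pyGetD grid 0 [])) 1).flatMap fun j =>
      swCellWords grid words (PySem.List.len grid) (PySem.List.len (PySem.List.pyGetD grid 0 [])) i j

theorem swScanPairFold :
    ∀ (l : List Int) (g : Int → List String)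
      (step : (PySem.Dict String Int × List String) → Int → PySem.Dict String Int × List String),
      (∀ st x, x ∈ l → step st x = ((g x).foldl swBump st.1, st.2 ++ g x)) →
      ∀ st, l.foldl step st = ((l.flatMap g).foldl swBump st.1, st.2 ++ l.flatMap g) := by
  intro l g step
  induction l with
  | nil => intro _ st; simp
  | cons x xs ih =>
    intro h st
    rw [List.foldl_cons, h st x List.mem_cons_self,
      ih (fun st y hy => h st y (List.mem_cons_of_mem _ hy))]
    simp [List.foldl_append]

theorem swBump_eq (m : PySem.Dict String Int) (w : String) :
    swBump m w = m.insert w (m.getD w 0 + 1) := by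
  unfold swBump
  rw [PySem.Dict.contains_eq_isSome_get?]
  cases hg : m.get? w with
  | none => rw [PySem.Dict.getD_of_get?_eq_none m 0 hg]; norm_num
  | some c => rw [PySem.Dict.getD_of_get?_eq_some m 0 hg]; simp

theorem swCellA (grid : List (List String)) (words : List String) (rows cols i j : Int)
    (st : PySem.Dict String Int × List String) :
    (if PySem.List.pyGetD (PySem.List.pyGetD grid i []) j "" ≠ "-" then
      swRayA (fun k => PySem.List.pyGetD (PySem.List.pyGetD grid k []) j "") words
        (PySem.List.pyRange i rows 1) ""
        (swRayA (fun k => PySem.List.pyGetD (PySem.List.pyGetD grid i []) k "") words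
          (PySem.List.pyRange j cols 1) "" st)
    else st)
    = ((swCellWords grid words rows cols i j).foldl swBump st.1,
        st.2 ++ swCellWords grid words rows cols i j) := by
  obtain ⟨m, f⟩ := st
  unfold swCellWords
  by_cases hg : PySem.List.pyGetD (PySem.List.pyGetD grid i []) j "" ≠ "-"
  · rw [if_pos hg, if_pos hg, swRayA_eq, swRayA_eq]
    simp [List.foldl_append]
  · rw [if_neg hg, if_neg hg]
    simp

theorem swCellB {words : List String} (hinv : swInv (swBuild words).1 (swBuild words).2 (swP words) words)
    (grid : List (List String)) (rows cols i j : Int) (fd : List String) :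
    (if PySem.List.pyGetD (PySem.List.pyGetD grid i []) j "" ≠ "-" then
      swRayB (swBuild words).1 (swBuild words).2
        (fun k => PySem.List.pyGetD (PySem.List.pyGetD grid k []) j "")
        (PySem.List.pyRange i rows 1) 0
        (swRayB (swBuild words).1 (swBuild words).2
          (fun k => PySem.List.pyGetD (PySem.List.pyGetD grid i []) k "")
          (PySem.List.pyRange j cols 1) 0 fd)
    else fd)
    = fd ++ swCellWords grid words rows cols i j := by
  have hnil : swWalk (swBuild words).1 0 ("" : String).toList = some 0 := rfl
  unfold swCellWords
  by_cases hg : PySem.List.pyGetD (PySem.List.pyGetD grid i []) j "" ≠ "-"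
  · rw [if_pos hg, if_pos hg, swRayB_eq hinv _ _ "" 0 _ hnil, swRayB_eq hinv _ _ "" 0 _ hnil]
    simp
  · rw [if_neg hg, if_neg hg]
    simp

theorem search_words_eq (grid : List (List String)) (words : List String) :
    search_words grid words =
      (((swAllWords grid words).foldl swBump PySem.Dict.empty).items, swAllWords grid words) := by
  simp only [search_words]
  have houter : ∀ st (i : Int),
      (PySem.List.pyRange 0 (PySem.List.len (PySem.List.pyGetD grid 0 [])) 1).foldl (fun st j =>
        if PySem.List.pyGetD (PySem.List.pyGetD grid i []) j "" ≠ "-" then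
          swRayA (fun k => PySem.List.pyGetD (PySem.List.pyGetD grid k []) j "") words
            (PySem.List.pyRange i (PySem.List.len grid) 1) ""
            (swRayA (fun k => PySem.List.pyGetD (PySem.List.pyGetD grid i []) k "") words
              (PySem.List.pyRange j (PySem.List.len (PySem.List.pyGetD grid 0 [])) 1) "" st)
        else st) st
      = (((PySem.List.pyRange 0 (PySem.List.len (PySem.List.pyGetD grid 0 [])) 1).flatMap
            (fun j => swCellWords grid words (PySem.List.len grid)
              (PySem.List.len (PySem.List.pyGetD grid 0 [])) i j)).foldl swBump st.1,
          st.2 ++ (PySem.List.pyRange 0 (PySem.List.len (PySem.List.pyGetD grid 0 [])) 1).flatMap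
            (fun j => swCellWords grid words (PySem.List.len grid)
              (PySem.List.len (PySem.List.pyGetD grid 0 [])) i j)) := by
    intro st i
    exact swScanPairFold _ _ _
      (fun st j _ => swCellA grid words (PySem.List.len grid)
        (PySem.List.len (PySem.List.pyGetD grid 0 [])) i j st) st
  rw [swScanPairFold _ _ _ (fun st i _ => houter st i) (PySem.Dict.empty, [])]
  rfl

theorem search_words_alt_eq (grid : List (List String)) (words : List String) :
    search_words_alt grid words =
      (((swAllWords grid words).foldl swBump PySem.Dict.empty).items, swAllWords grid words) := by
  simp only [search_words_alt]
  have hinv := swBuild_inv words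
  have hms : ∀ (found : List String),
      found.foldl (fun m w => m.insert w (m.getD w 0 + 1)) PySem.Dict.empty =
        found.foldl swBump PySem.Dict.empty :=
    fun found => (PySem.List.foldl_congr_mem found _ _ _
      (fun acc x _ => (swBump_eq acc x).symm))
  have houter : ∀ (fd : List String) (i : Int),
      (PySem.List.pyRange 0 (PySem.List.len (PySem.List.pyGetD grid 0 [])) 1).foldl (fun fd j =>
        if PySem.List.pyGetD (PySem.List.pyGetD grid i []) j "" ≠ "-" then
          swRayB (swBuild words).1 (swBuild words).2
            (fun k => PySem.List.pyGetD (PySem.List.pyGetD grid k []) j "")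
            (PySem.List.pyRange i (PySem.List.len grid) 1) 0
            (swRayB (swBuild words).1 (swBuild words).2
              (fun k => PySem.List.pyGetD (PySem.List.pyGetD grid i []) k "")
              (PySem.List.pyRange j (PySem.List.len (PySem.List.pyGetD grid 0 [])) 1) 0 fd)
        else fd) fd
      = fd ++ (PySem.List.pyRange 0 (PySem.List.len (PySem.List.pyGetD grid 0 [])) 1).flatMap
          (fun j => swCellWords grid words (PySem.List.len grid)
            (PySem.List.len (PySem.List.pyGetD grid 0 [])) i j) := by
    intro fd i
    rw [PySem.List.foldl_congr_mem _ _
      (fun fd j => fd ++ swCellWords grid words (PySem.List.len grid)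
        (PySem.List.len (PySem.List.pyGetD grid 0 [])) i j) fd
      (fun acc x _ => swCellB hinv grid (PySem.List.len grid)
        (PySem.List.len (PySem.List.pyGetD grid 0 [])) i x acc)]
    exact PySem.List.foldl_append_eq_flatMap _ _ _
  have hfound :
      (PySem.List.pyRange 0 (PySem.List.len grid) 1).foldl (fun fd i =>
        (PySem.List.pyRange 0 (PySem.List.len (PySem.List.pyGetD grid 0 [])) 1).foldl (fun fd j =>
          if PySem.List.pyGetD (PySem.List.pyGetD grid i []) j "" ≠ "-" then
            swRayB (swBuild words).1 (swBuild words).2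
              (fun k => PySem.List.pyGetD (PySem.List.pyGetD grid k []) j "")
              (PySem.List.pyRange i (PySem.List.len grid) 1) 0
              (swRayB (swBuild words).1 (swBuild words).2
                (fun k => PySem.List.pyGetD (PySem.List.pyGetD grid i []) k "")
                (PySem.List.pyRange j (PySem.List.len (PySem.List.pyGetD grid 0 [])) 1) 0 fd)
          else fd) fd) ([] : List String)
      = swAllWords grid words := by
    rw [PySem.List.foldl_congr_mem _ _
      (fun fd i => fd ++ (PySem.List.pyRange 0 (PySem.List.len (PySem.List.pyGetD grid 0 [])) 1).flatMap
        (fun j => swCellWords grid words (PySem.List.len grid)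
          (PySem.List.len (PySem.List.pyGetD grid 0 [])) i j)) []
      (fun acc x _ => houter acc x)]
    rw [PySem.List.foldl_append_eq_flatMap]
    rfl
  rw [hfound, hms]

-- ===== VERDICT (by name: the statement is the Claim_ definition above) =====
theorem search_words_spec : Claim_equal_search_words := by
  intro grid words _hdom _hpre
  unfold Spec_search_words
  rw [search_words_eq, search_words_alt_eq]
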